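-- pv_equiv track=rewrite | github.com/yxngles13/3110PythonNumericalLiteralChecker | decint.py | is_decint
-- ===== SOURCE A (Python) =====
-- def is_decint(s):
--     if len(s) == 0:
--         return False
--
--     state = 'q1'  # start
--
--     for i, char in enumerate(s):
--         if state == 'q1':
--             if char == '0':
--                 # "0" alone is fine, but anything else after it is invalid
--                 state = 'q0'
--             elif '1' <= char <= '9':
--                 state = 'q2'
--             else:
--                 return False
--
--         elif state == 'q0':
--             # if we started with 0, no more characters allowed
--             return False
--
--         elif state == 'q2':
--             if '0' <= char <= '9':
--                 state = 'q2'
--             elif char == '_':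
--                 # underscore must be followed by a digit
--                 # reject trailing underscores immediately
--                 if i == len(s) - 1:
--                     return False
--                 state = 'q3'
--             else:
--                 return False
--
--         elif state == 'q3':
--             # must have a digit after underscore
--             if '0' <= char <= '9':
--                 state = 'q2'
--             else:
--                 return False
--
--     # Accepting states
--     return state in ('q0', 'q2')
-- ===== SOURCE B (Python) =====
-- def is_decint(s):
--     if s == '0':
--         return True
--     if not s or s[0] not in '123456789' or s[-1] == '_':
--         return False
--     return all(p and all(c in '0123456789' for c in p) for p in s.split('_'))
-- ===== Notes on version B (the rewrite author's own statement) =====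
-- stated objective: simpler
-- what changed: Replaced the four-state character-by-character state machine with a split-on-underscore strategy: special-case '0', check the first character is 1-9 and the last is not '_', then require every '_'-separated group to be nonempty and all ASCII digits.
import Mathlib
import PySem

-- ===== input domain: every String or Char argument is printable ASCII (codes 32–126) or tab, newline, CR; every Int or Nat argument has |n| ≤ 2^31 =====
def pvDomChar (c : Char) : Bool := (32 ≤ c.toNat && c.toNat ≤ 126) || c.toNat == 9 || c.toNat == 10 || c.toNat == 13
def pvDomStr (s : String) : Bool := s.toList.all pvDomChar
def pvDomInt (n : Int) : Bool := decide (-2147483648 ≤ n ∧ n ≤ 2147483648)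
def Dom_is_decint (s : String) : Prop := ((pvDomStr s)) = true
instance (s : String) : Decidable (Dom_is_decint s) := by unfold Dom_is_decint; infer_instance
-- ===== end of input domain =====

-- B replaces A's character-by-character four-state machine by split-on-underscore group validation (objective: simpler).

-- ===== PORT A =====
---- literal transliteration of A's state machine; the enumerate loop with its
-- early returns becomes structural recursion on the remaining characters
-- (Python's `i == len(s) - 1` is `rest = []` at the current character).
def goA (st : String) (cs : List Char) : Bool :=
  match cs with
  | [] => st == "q0" || st == "q2"          -- `return state in ('q0', 'q2')`
  | c :: rest =>
    if st == "q1" then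
      if c == '0' then goA "q0" rest
      else if ('1' ≤ c && c ≤ '9') then goA "q2" rest
      else false
    else if st == "q0" then false
    else if st == "q2" then
      if ('0' ≤ c && c ≤ '9') then goA "q2" rest
      else if c == '_' then
        (if rest.isEmpty then false else goA "q3" rest)
      else false
    else if st == "q3" then
      if ('0' ≤ c && c ≤ '9') then goA "q2" rest
      else false
    else false

def is_decint (s : String) : Bool :=
  if s.toList.length == 0 then false else goA "q1" s.toList

-- ===== PORT B =====
-- c in '0123456789'
def digitB (c : Char) : Bool := "0123456789".toList.contains c

-- split-into-groups validation: "0" alone; else first char 1-9, no trailing '_',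
-- and every '_'-separated group nonempty and all-digit.
-- s.split('_') is ported as List.splitOn '_' on the character list.
def is_decint_alt (s : String) : Bool :=
  if s == "0" then true
  else if s.toList.isEmpty || !("123456789".toList.contains s.toList.headI)
          || (s.toList.getLast? == some '_') then false
  else (List.splitOn '_' s.toList).all (fun p => !p.isEmpty && p.all digitB)

-- ===== PRECONDITION & SPEC =====
def Spec_is_decint (s : String) (out : Bool) : Prop := out = is_decint_alt s
instance (s : String) (out : Bool) : Decidable (Spec_is_decint s out) := by unfold Spec_is_decint; infer_instance

-- ===== CLAIM (what is proved, stated in full; the proofs are below) =====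
def Claim_equal_is_decint : Prop := ∀ (s : String), Dom_is_decint s → Spec_is_decint s (is_decint s)

-- ===== LEMMAS AND PROOFS =====

theorem tn_inj (c d : Char) (h : c.toNat = d.toNat) : c = d :=
  Char.ext (UInt32.toNat_inj.mp h)

theorem le_toNat (a b : Char) : (a ≤ b) ↔ a.toNat ≤ b.toNat := by
  simp [Char.le_def, UInt32.le_iff_toNat_le]

theorem eq_toNat (c d : Char) : (c = d) ↔ (c.toNat = d.toNat) :=
  ⟨fun h => by rw [h], tn_inj c d⟩

theorem dig_eq (c : Char) : (('0' ≤ c) && (c ≤ '9')) = digitB c := by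
  unfold digitB
  rw [Bool.eq_iff_iff, show "0123456789".toList = ['0','1','2','3','4','5','6','7','8','9'] from rfl]
  simp [le_toNat, eq_toNat, show '0'.toNat = 48 from rfl, show '1'.toNat = 49 from rfl, show '2'.toNat = 50 from rfl, show '3'.toNat = 51 from rfl, show '4'.toNat = 52 from rfl, show '5'.toNat = 53 from rfl, show '6'.toNat = 54 from rfl, show '7'.toNat = 55 from rfl, show '8'.toNat = 56 from rfl, show '9'.toNat = 57 from rfl]
  omega

theorem nz_eq (c : Char) : (('1' ≤ c) && (c ≤ '9')) = ("123456789".toList.contains c) := by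
  rw [Bool.eq_iff_iff, show "123456789".toList = ['1','2','3','4','5','6','7','8','9'] from rfl]
  simp [le_toNat, eq_toNat, show '1'.toNat = 49 from rfl, show '2'.toNat = 50 from rfl, show '3'.toNat = 51 from rfl, show '4'.toNat = 52 from rfl, show '5'.toNat = 53 from rfl, show '6'.toNat = 54 from rfl, show '7'.toNat = 55 from rfl, show '8'.toNat = 56 from rfl, show '9'.toNat = 57 from rfl]
  omega

-- proof-side split: (current group, remaining groups) of splitting on '_'
def mysplit : List Char → List Char × List (List Char)
  | [] => ([], [])
  | c :: r =>
    let p := mysplit r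
    if c == '_' then ([], p.1 :: p.2) else (c :: p.1, p.2)

theorem splitOn_eq (t : List Char) :
    List.splitOn '_' t = (mysplit t).1 :: (mysplit t).2 := by
  induction t with
  | nil => rfl
  | cons c r ih =>
    by_cases hc : c = '_'
    · subst hc
      rw [show List.splitOn '_' ('_' :: r) = [] :: List.splitOn '_' r by
            simp [List.splitOn, List.splitOnP_cons], ih]
      simp [mysplit]
    · have hb : (c == '_') = false := by simpa using hc
      have hne := List.splitOnP_ne_nil (fun x => x == '_') r
      rw [show List.splitOn '_' (c :: r)
            = (c :: (List.splitOn '_' r).headI) :: (List.splitOn '_' r).tail by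
            simp only [List.splitOn, List.splitOnP_cons, hb, Bool.false_eq_true, not_false_iff,
              if_neg]
            obtain ⟨a, as, ha⟩ := List.exists_cons_of_ne_nil hne
            rw [ha]; rfl, ih]
      simp [mysplit, hb]

def allDig (p : List Char) : Bool := p.all digitB
def condParts (ps : List (List Char)) : Bool := ps.all (fun p => !p.isEmpty && allDig p)

theorem q2q3 (t : List Char) :
    (goA "q2" t = (allDig (mysplit t).1 && condParts (mysplit t).2)) ∧
    (goA "q3" t = ((!(mysplit t).1.isEmpty && allDig (mysplit t).1) && condParts (mysplit t).2)) := by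
  induction t with
  | nil => constructor <;> rfl
  | cons c r ih =>
    obtain ⟨ih2, ih3⟩ := ih
    by_cases hd : ('0' ≤ c && c ≤ '9') = true
    · have hdb : digitB c = true := by rw [← dig_eq]; exact hd
      have hu : (c == '_') = false := by
        have : c ≠ '_' := by
          intro h; subst h; rw [← hdb] at hd; simp [digitB] at hdb
        simpa using this
      constructor <;>
        simp [goA, hd, mysplit, hu, allDig, condParts, hdb, ih2, Bool.and_assoc]
    · by_cases hu : c = '_'
      · subst hu
        have hd' : (('0' ≤ '_') && ('_' ≤ '9')) = false := by decide
        constructor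
        · cases r with
          | nil => simp [goA, hd', mysplit, condParts, allDig]
          | cons c' r' =>
            have hL : goA "q2" ('_' :: c' :: r') = goA "q3" (c' :: r') := by
              simp [goA, hd']
            rw [hL, ih3]
            simp only [mysplit, if_pos rfl, condParts, allDig, List.all_cons, List.all_nil,
              Bool.true_and]
            rfl
        · simp [goA, hd', mysplit, allDig, condParts]
      · have hub : (c == '_') = false := by simpa using hu
        have hdb : digitB c = false := by rw [← dig_eq]; simpa using hd
        constructor <;>
          simp [goA, hd, hub, mysplit, allDig, condParts, hdb]

-- a string ending in '_' always fails the group validation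
theorem ends_underscore (t : List Char) (h : t.getLast? = some '_') :
    (allDig (mysplit t).1 && condParts (mysplit t).2) = false := by
  induction t with
  | nil => simp at h
  | cons c r ih =>
    cases r with
    | nil =>
      have : c = '_' := by simpa using h
      subst this; rfl
    | cons c' r' =>
      have hlast : (c' :: r').getLast? = some '_' := by
        rwa [List.getLast?_cons_cons] at h
      have ihr := ih hlast
      by_cases hc : c = '_'
      · subst hc
        have hm : mysplit ('_' :: c' :: r')
            = ([], (mysplit (c' :: r')).1 :: (mysplit (c' :: r')).2) := by
          simp [mysplit]
        rw [hm]
        rw [show allDig ([] : List Char) = true from rfl, Bool.true_and,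
          show condParts ((mysplit (c' :: r')).1 :: (mysplit (c' :: r')).2)
            = ((!(mysplit (c' :: r')).1.isEmpty && allDig (mysplit (c' :: r')).1)
                && condParts (mysplit (c' :: r')).2) from rfl]
        rcases Bool.and_eq_false_iff.mp ihr with h1 | h1 <;> rw [h1] <;> simp
      · have hub : (c == '_') = false := by simpa using hc
        have hm : mysplit (c :: c' :: r')
            = (c :: (mysplit (c' :: r')).1, (mysplit (c' :: r')).2) := by
          simp [mysplit, hub]
        rw [hm]
        rw [show allDig (c :: (mysplit (c' :: r')).1)
            = (digitB c && allDig (mysplit (c' :: r')).1) from rfl]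
        rcases Bool.and_eq_false_iff.mp ihr with h1 | h1 <;> rw [h1] <;> simp

theorem toList_zero (s : String) : s = "0" ↔ s.toList = ['0'] := by
  constructor
  · intro h; subst h; rfl
  · intro h
    exact String.toList_inj.mp (by rw [h]; rfl)

theorem main_eq (s : String) : is_decint s = is_decint_alt s := by
  unfold is_decint is_decint_alt
  by_cases h0 : s = "0"
  · subst h0; decide
  · have h0b : (s == "0") = false := by simpa using h0
    rw [h0b]
    cases hs : s.toList with
    | nil => simp [hs]
    | cons c t =>
      have hne : (((c :: t).length == 0)) = false := by simp
      rw [hne]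
      simp only [Bool.if_false_left, List.isEmpty_cons, List.headI_cons, Bool.false_or]
      by_cases hc0 : c = '0'
      · subst hc0
        cases t with
        | nil => exact absurd ((toList_zero s).mpr hs) h0
        | cons c' t' =>
          have : ("123456789".toList.contains '0') = false := by decide
          simp [goA, this]
      · by_cases h19 : (('1' ≤ c) && (c ≤ '9')) = true
        · have hcont : ("123456789".toList.contains c) = true := by rw [← nz_eq]; exact h19
          have hc0b : (c == '0') = false := by simpa using hc0
          have hq1 : goA "q1" (c :: t) = goA "q2" t := by
            simp [goA, hc0b, h19]
          rw [hq1, hcont]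
          have hd : (('0' ≤ c) && (c ≤ '9')) = true := by
            obtain ⟨ha, hb⟩ : ('1' ≤ c) ∧ (c ≤ '9') := by simpa using h19
            have h1 : '1'.toNat ≤ c.toNat := (le_toNat '1' c).mp ha
            have h0 : '0' ≤ c := (le_toNat '0' c).mpr (by
              rw [show '0'.toNat = 48 from rfl]
              rw [show '1'.toNat = 49 from rfl] at h1
              omega)
            simpa using ⟨h0, hb⟩
          have hcu : (c == '_') = false := by
            have : c ≠ '_' := by
              intro h; subst h; exact absurd hd (by decide)
            simpa using this
          by_cases hl : (c :: t).getLast? = some '_'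
          · have hlb : ((c :: t).getLast? == some '_') = true := by simpa using hl
            rw [hlb]
            cases t with
            | nil =>
              exfalso
              have : c = '_' := by simpa using hl
              exact absurd this (by simpa using hcu)
            | cons c' t' =>
              have hlast : (c' :: t').getLast? = some '_' := by
                rwa [List.getLast?_cons_cons] at hl
              simp only [Bool.not_true, Bool.or_true, Bool.true_or, if_true]
              rw [(q2q3 (c' :: t')).1, ends_underscore _ hlast]
              simp
          · have hlb : ((c :: t).getLast? == some '_') = false := by simpa using hl
            rw [hlb]
            simp only [Bool.not_true, Bool.or_false, Bool.not_false, if_false]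
            rw [(q2q3 t).1, splitOn_eq (c :: t)]
            have hdb : digitB c = true := by rw [← dig_eq]; exact hd
            simp [mysplit, hcu, allDig, condParts, hdb, Bool.and_assoc]
        · have hcont : ("123456789".toList.contains c) = false := by
            rw [← nz_eq]; simpa using h19
          have hc0b : (c == '0') = false := by simpa using hc0
          have h19b : (('1' ≤ c) && (c ≤ '9')) = false := Bool.eq_false_iff.mpr h19
          have hA : goA "q1" (c :: t) = false := by simp [goA, hc0b, h19b]
          rw [hA, hcont]
          simp

-- ===== VERDICT (by name: the statement is the Claim_ definition above) =====
theorem is_decint_spec : Claim_equal_is_decint := by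
  intro s _
  unfold Spec_is_decint
  exact main_eq s
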